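-- pv_equiv track=rewrite | github.com/dukeceicenter/AutoEDA | src/codebleu_tcl/codebleu/codebleu/syntax_match.py | _get_eda_stage
-- ===== SOURCE A (Python) =====
-- def _get_eda_stage(command_name):
--     """Get EDA stage for a command"""
--     eda_stages = {
--         'synthesis': ['analyze', 'elaborate', 'compile', 'compile_ultra', 'set_max_fanout',
--                      'set_max_transition', 'create_clock', 'report_timing', 'report_area'],
--         'placement': ['floorPlan', 'placeDesign', 'setPlaceMode', 'checkPlace', 'refinePlace'],
--         'cts': ['ccopt_design', 'create_clock_tree_spec', 'set_ccopt_property'],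
--         'route': ['routeDesign', 'setRouteMode', 'checkRoute', 'addFiller']
--     }
--
--     for stage, commands in eda_stages.items():
--         if command_name in commands:
--             return stage
--     return 'unknown'
-- ===== SOURCE B (Python) =====
-- # Binary search over a single sorted (command, stage) table instead of a dict of lists.
-- _TABLE = [
--     ('addFiller', 'route'),
--     ('analyze', 'synthesis'),
--     ('ccopt_design', 'cts'),
--     ('checkPlace', 'placement'),
--     ('checkRoute', 'route'),
--     ('compile', 'synthesis'),
--     ('compile_ultra', 'synthesis'),
--     ('create_clock', 'synthesis'),
--     ('create_clock_tree_spec', 'cts'),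
--     ('elaborate', 'synthesis'),
--     ('floorPlan', 'placement'),
--     ('placeDesign', 'placement'),
--     ('refinePlace', 'placement'),
--     ('report_area', 'synthesis'),
--     ('report_timing', 'synthesis'),
--     ('routeDesign', 'route'),
--     ('setPlaceMode', 'placement'),
--     ('setRouteMode', 'route'),
--     ('set_ccopt_property', 'cts'),
--     ('set_max_fanout', 'synthesis'),
--     ('set_max_transition', 'synthesis'),
-- ]
--
-- def _get_eda_stage(command_name):
--     """Get EDA stage for a command"""
--     lo, hi = 0, len(_TABLE)
--     while lo < hi:
--         mid = (lo + hi) // 2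
--         key, stage = _TABLE[mid]
--         if command_name == key:
--             return stage
--         if command_name < key:
--             hi = mid
--         else:
--             lo = mid + 1
--     return 'unknown'
-- ===== Notes on version B (the rewrite author's own statement) =====
-- stated objective: alternative
-- what changed: Replaced the stage->command-list dict with a per-stage membership scan by a single sorted (command, stage) table searched with a hand-written binary search (lo/hi while loop), falling back to the same default string when the search misses.
import Mathlib
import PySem

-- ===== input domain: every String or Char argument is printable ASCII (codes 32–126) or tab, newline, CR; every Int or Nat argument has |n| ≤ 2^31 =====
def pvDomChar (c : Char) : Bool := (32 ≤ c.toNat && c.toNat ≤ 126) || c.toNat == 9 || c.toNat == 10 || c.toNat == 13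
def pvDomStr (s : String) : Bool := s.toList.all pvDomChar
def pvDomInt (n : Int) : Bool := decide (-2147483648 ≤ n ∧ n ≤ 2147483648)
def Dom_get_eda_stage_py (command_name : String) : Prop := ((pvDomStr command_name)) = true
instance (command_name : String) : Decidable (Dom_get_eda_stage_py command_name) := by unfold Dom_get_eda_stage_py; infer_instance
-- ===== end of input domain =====

-- B replaces A's stage→command-list dict with per-stage membership scans by one sorted (command, stage) table searched with a hand-written binary search (alternative algorithm, same results).

-- ===== PORT A =====
-- A's dict literal: insertion-ordered stage → command list
def pvEdaStages : List (String × List String) :=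
  [ ("synthesis", ["analyze", "elaborate", "compile", "compile_ultra", "set_max_fanout", "set_max_transition", "create_clock", "report_timing", "report_area"]),
    ("placement", ["floorPlan", "placeDesign", "setPlaceMode", "checkPlace", "refinePlace"]),
    ("cts", ["ccopt_design", "create_clock_tree_spec", "set_ccopt_property"]),
    ("route", ["routeDesign", "setRouteMode", "checkRoute", "addFiller"]) ]

-- the 'for stage, commands in eda_stages.items(): if command_name in commands: return stage' loop
def pvScanStages (command_name : String) : List (String × List String) → String
  | [] => "unknown"
  | (stage, commands) :: rest =>
      if commands.contains command_name then stage else pvScanStages command_name rest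

def get_eda_stage_py (command_name : String) : String :=
  pvScanStages command_name pvEdaStages

-- ===== PORT B =====
-- B's module-level sorted table (command, stage), in Python's string order
def pvTable : List (String × String) :=
  [ ("addFiller", "route"),
    ("analyze", "synthesis"),
    ("ccopt_design", "cts"),
    ("checkPlace", "placement"),
    ("checkRoute", "route"),
    ("compile", "synthesis"),
    ("compile_ultra", "synthesis"),
    ("create_clock", "synthesis"),
    ("create_clock_tree_spec", "cts"),
    ("elaborate", "synthesis"),
    ("floorPlan", "placement"),
    ("placeDesign", "placement"),
    ("refinePlace", "placement"),
    ("report_area", "synthesis"),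
    ("report_timing", "synthesis"),
    ("routeDesign", "route"),
    ("setPlaceMode", "placement"),
    ("setRouteMode", "route"),
    ("set_ccopt_property", "cts"),
    ("set_max_fanout", "synthesis"),
    ("set_max_transition", "synthesis") ]

-- B's while loop: binary search on [lo, hi); `_TABLE[mid]` is always in range here,
-- rendered as List.getD with an unused default
def pvBinSearch (command_name : String) (lo hi : Nat) : String :=
  if _h : lo < hi then
    let mid := (lo + hi) / 2
    let p := pvTable.getD mid ("", "")
    if command_name = p.1 then p.2
    else if command_name < p.1 then pvBinSearch command_name lo mid
    else pvBinSearch command_name (mid + 1) hi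
  else "unknown"
  termination_by hi - lo
  decreasing_by all_goals omega

def get_eda_stage_py_alt (command_name : String) : String :=
  pvBinSearch command_name 0 pvTable.length

-- ===== PRECONDITION & SPEC =====
def Spec_get_eda_stage_py (command_name : String) (out : String) : Prop := out = get_eda_stage_py_alt command_name
instance (command_name : String) (out : String) : Decidable (Spec_get_eda_stage_py command_name out) := by unfold Spec_get_eda_stage_py; infer_instance

-- ===== CLAIM (what is proved, stated in full; the proofs are below) =====
def Claim_equal_get_eda_stage_py : Prop := ∀ (command_name : String), Dom_get_eda_stage_py command_name → Spec_get_eda_stage_py command_name (get_eda_stage_py command_name)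

-- ===== LEMMAS AND PROOFS =====

-- If the binary search returns a stage, the query equals some key of the table.
theorem pvBinSearch_mem (c : String) (lo hi : Nat) (hhi : hi ≤ pvTable.length)
    (h : pvBinSearch c lo hi ≠ "unknown") : ∃ p ∈ pvTable, c = p.1 := by
  fun_induction pvBinSearch c lo hi with
  | case1 lo hi hlt mid p heq =>
      refine ⟨p, ?_, heq⟩
      have hm : mid < pvTable.length := by omega
      have : pvTable.getD mid ("", "") = pvTable[mid] := List.getD_eq_getElem _ _ hm
      rw [show p = pvTable.getD mid ("", "") from rfl, this]
      exact List.getElem_mem hm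
  | case2 lo hi hlt mid p hne hltk ih => exact ih (by omega) h
  | case3 lo hi hlt mid p hne hge ih => exact ih hhi h
  | case4 lo hi hge => exact absurd rfl h

theorem get_eda_stage_eq (c : String) :
    get_eda_stage_py c = get_eda_stage_py_alt c := by
  by_cases hc : ∃ p ∈ pvTable, c = p.1
  · obtain ⟨p, hp, rfl⟩ := hc
    simp only [pvTable, List.mem_cons, List.not_mem_nil, or_false] at hp
    rcases hp with rfl|rfl|rfl|rfl|rfl|rfl|rfl|rfl|rfl|rfl|rfl|rfl|rfl|rfl|rfl|rfl|rfl|rfl|rfl|rfl|rfl <;>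
      (simp [get_eda_stage_py, get_eda_stage_py_alt, pvScanStages, pvEdaStages, pvTable, pvBinSearch]) <;> decide
  · have halt : get_eda_stage_py_alt c = "unknown" := by
      by_contra hne
      exact hc (pvBinSearch_mem c 0 pvTable.length le_rfl hne)
    rw [halt]
    push Not at hc
    simp only [pvTable, List.mem_cons, List.not_mem_nil, or_false, forall_eq_or_imp, forall_eq] at hc
    obtain ⟨h1,h2,h3,h4,h5,h6,h7,h8,h9,h10,h11,h12,h13,h14,h15,h16,h17,h18,h19,h20,h21⟩ := hc
    simp [get_eda_stage_py, pvScanStages, pvEdaStages,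
      h1,h2,h3,h4,h5,h6,h7,h8,h9,h10,h11,h12,h13,h14,h15,h16,h17,h18,h19,h20,h21]

-- ===== VERDICT (by name: the statement is the Claim_ definition above) =====
theorem get_eda_stage_py_spec : Claim_equal_get_eda_stage_py := by
  intro c _
  exact get_eda_stage_eq c
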